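-- pv_equiv track=rewrite | github.com/doncamilom/1868_SubstancesStudy | periodSys/Genetic1D/comparePSs.py | compareNGrams_asym
-- ===== SOURCE A (Python) =====
-- def getNGrams(seq,N):
--     """Returns a list of NGrams (sets) in seq"""
--     ngrams = []
--     for i in range(len(seq)-N+1):
--         ngrams.append(set(seq[i:i+N]))
--     return ngrams
--
-- def compareNGrams_asym(seq1,seq2,N,lenSeq1):
--     """Compare NGrams of seq1 and seq2
--     Calculate number of NGrams of seq1 that are also in seq2, divided by number of NGrams in seq1
--         As some elements are lacking for some years,
--         compare only the patterns formed by existing elements (lenSeq1 first elems)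
--     """
--     ng1 = getNGrams(seq1[:lenSeq1],N)
--     ng2 = getNGrams(seq2,N)
--
--     total = 0
--     for i in ng1:
--         for j in ng2:
--             if len(i.intersection(j)) > 1:
--                 total += 1
--     return total
-- ===== SOURCE B (Python) =====
-- def getNGrams(seq, N):
--     """Returns a list of NGrams (sets) in seq"""
--     ngrams = []
--     for i in range(len(seq) - N + 1):
--         ngrams.append(set(seq[i:i + N]))
--     return ngrams
--
-- def compareNGrams_asym(seq1, seq2, N, lenSeq1):
--     ng1 = getNGrams(seq1[:lenSeq1], N)
--     ng2 = getNGrams(seq2, N)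
--     # inverted index: element -> indices of the ngrams of seq2 containing it
--     idx = {}
--     for j, g in enumerate(ng2):
--         for e in g:
--             idx.setdefault(e, []).append(j)
--     total = 0
--     for g in ng1:
--         cnt = {}
--         for e in g:
--             for j in idx.get(e, ()):
--                 cnt[j] = cnt.get(j, 0) + 1
--         total += sum(1 for c in cnt.values() if c >= 2)
--     return total
-- ===== Notes on version B (the rewrite author's own statement) =====
-- stated objective: faster
-- what changed: Replaces A's all-pairs scan (intersecting every ngram of seq1 with every ngram of seq2) by an inverted index from element to the seq2-ngram indices containing it, built once; each seq1-ngram then tallies index multiplicities and counts the indices hit at least twice.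
import Mathlib
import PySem

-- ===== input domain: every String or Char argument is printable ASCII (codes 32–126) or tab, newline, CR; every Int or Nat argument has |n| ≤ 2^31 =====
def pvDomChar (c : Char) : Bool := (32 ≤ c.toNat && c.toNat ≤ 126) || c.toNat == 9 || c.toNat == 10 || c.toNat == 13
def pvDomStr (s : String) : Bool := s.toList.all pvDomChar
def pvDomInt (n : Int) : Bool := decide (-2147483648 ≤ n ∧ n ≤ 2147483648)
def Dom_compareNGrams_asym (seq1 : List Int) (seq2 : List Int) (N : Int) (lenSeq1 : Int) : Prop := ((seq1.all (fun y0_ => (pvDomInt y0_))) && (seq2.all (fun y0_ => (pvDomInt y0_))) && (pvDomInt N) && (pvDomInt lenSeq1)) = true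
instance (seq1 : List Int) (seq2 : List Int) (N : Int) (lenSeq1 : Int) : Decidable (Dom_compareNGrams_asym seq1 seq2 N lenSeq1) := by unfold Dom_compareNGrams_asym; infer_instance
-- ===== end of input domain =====

-- B replaces A's all-pairs intersection scan by an inverted index (element → ngram indices of seq2)
-- plus per-ngram multiplicity counting; measurably faster on realistic inputs (objective: faster).

-- ===== PORT A =====
-- helper getNGrams, shared verbatim by both Python versions (windows as Python sets)
def pvGetNGrams (seq : List Int) (N : Int) : List (PySem.Set Int) :=
  (PySem.List.pyRange 0 ((seq.length : Int) - N + 1) 1).foldl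
    (fun ngrams i => ngrams ++ [PySem.Set.ofList (PySem.List.slice seq (some i) (some (i + N)))]) []

def compareNGrams_asym (seq1 : List Int) (seq2 : List Int) (N : Int) (lenSeq1 : Int) : Int :=
  let ng1 := pvGetNGrams (PySem.List.slice seq1 none (some lenSeq1)) N
  let ng2 := pvGetNGrams seq2 N
  ng1.foldl (fun total i =>
    ng2.foldl (fun total j =>
      if 1 < PySem.Set.len (PySem.Set.inter i j) then total + 1 else total) total) 0

-- ===== PORT B =====
def compareNGrams_asym_alt (seq1 : List Int) (seq2 : List Int) (N : Int) (lenSeq1 : Int) : Int :=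
  let ng1 := pvGetNGrams (PySem.List.slice seq1 none (some lenSeq1)) N
  let ng2 := pvGetNGrams seq2 N
  -- inverted index: element -> indices of the ngrams of seq2 containing it
  let idx : PySem.Dict Int (List Int) :=
    (PySem.List.enumerate ng2).foldl (fun d p =>
      p.2.foldl (fun d e => d.modify e [] (· ++ [p.1])) d) PySem.Dict.empty
  ng1.foldl (fun total g =>
    let cnt : PySem.Dict Int Int :=
      g.foldl (fun c e =>
        (idx.getD e []).foldl (fun c j => c.insert j (c.getD j 0 + 1)) c) PySem.Dict.empty
    total + ((cnt.values.countP (fun c => 2 ≤ c)) : Int)) 0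

-- ===== PRECONDITION & SPEC =====
def Spec_compareNGrams_asym (seq1 : List Int) (seq2 : List Int) (N : Int) (lenSeq1 : Int) (out : Int) : Prop := out = compareNGrams_asym_alt seq1 seq2 N lenSeq1
instance (seq1 : List Int) (seq2 : List Int) (N : Int) (lenSeq1 : Int) (out : Int) : Decidable (Spec_compareNGrams_asym seq1 seq2 N lenSeq1 out) := by unfold Spec_compareNGrams_asym; infer_instance

-- ===== CLAIM (what is proved, stated in full; the proofs are below) =====
def Claim_equal_compareNGrams_asym : Prop := ∀ (seq1 : List Int) (seq2 : List Int) (N : Int) (lenSeq1 : Int), Dom_compareNGrams_asym seq1 seq2 N lenSeq1 → Spec_compareNGrams_asym seq1 seq2 N lenSeq1 (compareNGrams_asym seq1 seq2 N lenSeq1)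


-- ===== LEMMAS AND PROOFS =====

-- the inverted index of B, as a named object for the proofs
def pvIdx (ng2 : List (PySem.Set Int)) : PySem.Dict Int (List Int) :=
  (PySem.List.enumerate ng2).foldl (fun d p =>
    p.2.foldl (fun d e => d.modify e [] (· ++ [p.1])) d) PySem.Dict.empty

-- the multiset of seq2-ngram indices hit by the elements of g
def pvL (ng2 : List (PySem.Set Int)) (g : PySem.Set Int) : List Int :=
  g.flatMap (fun e => (pvIdx ng2).getD e [])

theorem pv_sum_swap {a b : Type} (l1 : List a) (l2 : List b) (f : a -> b -> Nat) :
    (l1.map (fun x => ((l2.map (f x)).sum))).sum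
      = (l2.map (fun y => ((l1.map (fun x => f x y)).sum))).sum := by
  induction l1 with
  | nil => simp
  | cons x xs ih =>
    have hadd : ∀ (l : List b) (u v : b → Nat),
        (l.map (fun y => u y + v y)).sum = (l.map u).sum + (l.map v).sum := by
      intro l u v
      induction l with
      | nil => simp
      | cons z zs ihz => simp [ihz]; omega
    simp only [List.map_cons, List.sum_cons, ih]
    rw [← hadd]

theorem pv_filter_beq_nodup (l : List Int) (hl : l.Nodup) (e : Int) :
    l.filter (fun x => x == e) = if e ∈ l then [e] else [] := by
  rw [List.filter_beq]
  by_cases h : e ∈ l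
  · rw [List.count_eq_one_of_mem hl h]; simp [h]
  · rw [List.count_eq_zero_of_not_mem h]; simp [h]

theorem pv_idx_getD (ng2 : List (PySem.Set Int)) (h2 : ∀ h ∈ ng2, List.Nodup h) (e : Int) :
    (pvIdx ng2).getD e []
      = (PySem.List.enumerate ng2).flatMap (fun p => if e ∈ p.2 then [p.1] else []) := by
  have hmemE : ∀ p ∈ PySem.List.enumerate ng2, List.Nodup p.2 := by
    intro p hp
    rw [PySem.List.mem_enumerate_iff] at hp
    obtain ⟨k, hk, rfl⟩ := hp
    exact h2 _ (List.getElem_mem hk)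
  have hfold : pvIdx ng2
      = ((PySem.List.enumerate ng2).flatMap (fun p => p.2.map (fun e' => (e', p.1)))).foldl
          (fun d q => d.modify q.1 [] (· ++ [q.2])) PySem.Dict.empty := by
    unfold pvIdx
    rw [List.foldl_flatMap]
    simp only [List.foldl_map]
  rw [hfold, PySem.Dict.getD_foldl_modify_append]
  have key : ∀ (E : List (Int × PySem.Set Int)), (∀ p ∈ E, List.Nodup p.2) →
      ((E.flatMap (fun p => p.2.map (fun e' => (e', p.1)))).filter (fun q => q.1 == e)).map
          (fun q => q.2)
        = E.flatMap (fun p => if e ∈ p.2 then [p.1] else []) := by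
    intro E
    induction E with
    | nil => intro _; simp
    | cons p t ih =>
      intro hA
      simp only [List.flatMap_cons, List.filter_append, List.map_append,
        ih (fun q hq => hA q (List.mem_cons_of_mem _ hq))]
      congr 1
      rw [List.filter_map]
      have hfb := pv_filter_beq_nodup p.2 (hA p (List.mem_cons_self ..)) e
      by_cases hmem : e ∈ p.2 <;>
        simp [Function.comp_def, hfb, hmem]
  rw [key _ hmemE]
  simp [PySem.Dict.getD, PySem.Dict.empty, PySem.Dict.get?]

theorem pv_count_L (ng2 : List (PySem.Set Int)) (h2 : ∀ h ∈ ng2, List.Nodup h)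
    (g : PySem.Set Int) (j : Int) :
    (pvL ng2 g).count j
      = ((PySem.List.enumerate ng2).map (fun p =>
          if p.1 = j then List.countP (fun e => decide (e ∈ p.2)) g else 0)).sum := by
  have h01 : ∀ (l : List Int) (q : Int → Prop) (_ : DecidablePred q),
      (l.map (fun e => if q e then 1 else 0)).sum = l.countP (fun e => decide (q e)) := by
    intro l q hq
    induction l with
    | nil => simp
    | cons x xs ihx =>
      by_cases hx : q x
      · simp [hx, ihx, Nat.add_comm]
      · simp [hx, ihx]
  have hcnt : ∀ (e : Int), ((pvIdx ng2).getD e []).count j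
      = ((PySem.List.enumerate ng2).map (fun p =>
          if e ∈ p.2 then (if p.1 = j then 1 else 0) else 0)).sum := by
    intro e
    rw [pv_idx_getD ng2 h2 e, List.count_flatMap]
    simp only [Function.comp_def]
    congr 1
    apply List.map_congr_left
    intro p _
    by_cases hmem : e ∈ p.2 <;> by_cases hj : p.1 = j <;>
      simp [hmem, hj]
  unfold pvL
  rw [List.count_flatMap]
  simp only [Function.comp_def]
  have : (g.map fun e => ((pvIdx ng2).getD e []).count j)
      = g.map (fun e => ((PySem.List.enumerate ng2).map (fun p =>
          if e ∈ p.2 then (if p.1 = j then 1 else 0) else 0)).sum) := by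
    apply List.map_congr_left; intro e _; exact hcnt e
  rw [this, pv_sum_swap]
  congr 1
  apply List.map_congr_left
  intro p _
  by_cases hj : p.1 = j
  · simp only [if_pos hj]
    exact h01 g (fun e => e ∈ p.2) inferInstance
  · simp only [if_neg hj]
    simp

theorem pv_two_le_sum_ite (E : List (Int × PySem.Set Int))
    (hE : E.Pairwise (fun p q => p.1 < q.1)) (j : Int) (c : Int × PySem.Set Int → Nat) (n : Nat)
    (hn : 0 < n) :
    (n ≤ (E.map (fun p => if p.1 = j then c p else 0)).sum
      ↔ ∃ p ∈ E, p.1 = j ∧ n ≤ c p) := by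
  induction E with
  | nil => simpa using by omega
  | cons p t ih =>
    rw [List.pairwise_cons] at hE
    obtain ⟨hlt, ht⟩ := hE
    simp only [List.map_cons, List.sum_cons]
    by_cases hpj : p.1 = j
    · have hz : (t.map (fun q => if q.1 = j then c q else 0)).sum = 0 := by
        apply List.sum_eq_zero
        intro x hx
        simp only [List.mem_map] at hx
        obtain ⟨q, hq, rfl⟩ := hx
        have := hlt q hq
        rw [if_neg (by omega)]
      rw [if_pos hpj, hz]
      constructor
      · intro h; exact ⟨p, List.mem_cons_self .., hpj, by omega⟩
      · rintro ⟨q, hqmem, hqj, hq⟩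
        rcases List.mem_cons.mp hqmem with rfl | hq'
        · omega
        · exact absurd hqj (by have := hlt q hq'; omega)
    · rw [if_neg hpj, Nat.zero_add, ih ht]
      constructor
      · rintro ⟨q, hq, h⟩; exact ⟨q, List.mem_cons_of_mem _ hq, h⟩
      · rintro ⟨q, hqmem, hqj, hq⟩
        rcases List.mem_cons.mp hqmem with rfl | hq'
        · exact absurd hqj hpj
        · exact ⟨q, hq', hqj, hq⟩

theorem pv_perG (ng2 : List (PySem.Set Int)) (h2 : ∀ h ∈ ng2, List.Nodup h)
    (g : PySem.Set Int) :
    List.countP (fun h => decide (1 < PySem.Set.len (PySem.Set.inter g h))) ng2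
      = List.countP (fun j => decide ((2:Int) ≤ (((pvL ng2 g).count j : Nat) : Int)))
          (PySem.Set.ofList (pvL ng2 g)) := by
  have hE := PySem.List.pairwise_lt_enumerate ng2 0
  have hkey : ∀ j : Int, 2 ≤ (pvL ng2 g).count j
      ↔ ∃ p ∈ PySem.List.enumerate ng2, p.1 = j
          ∧ 2 ≤ List.countP (fun e => decide (e ∈ p.2)) g := by
    intro j
    rw [pv_count_L ng2 h2 g j]
    exact pv_two_le_sum_ite (PySem.List.enumerate ng2) hE j
      (fun p => List.countP (fun e => decide (e ∈ p.2)) g) 2 (by omega)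
  have hR : List.countP (fun j => decide ((2:Int) ≤ (((pvL ng2 g).count j : Nat) : Int)))
        (PySem.Set.ofList (pvL ng2 g))
      = List.countP (fun j => decide (2 ≤ (pvL ng2 g).count j))
          (PySem.Set.ofList (pvL ng2 g)) := by
    apply List.countP_congr
    intro j _
    simp only [decide_eq_true_eq]
    omega
  have hL : List.countP (fun h => decide (1 < PySem.Set.len (PySem.Set.inter g h))) ng2
      = List.countP (fun p => decide (2 ≤ List.countP (fun e => decide (e ∈ p.2)) g))
          (PySem.List.enumerate ng2) := by
    conv_lhs => rw [← PySem.List.map_snd_enumerate ng2 0]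
    rw [List.countP_map]
    apply List.countP_congr
    intro p _
    simp only [Function.comp_def, decide_eq_true_eq]
    have hlen : PySem.Set.len (PySem.Set.inter g p.2)
        = ((List.countP (fun e => decide (e ∈ p.2)) g : Nat) : Int) := by
      simp [PySem.Set.len, PySem.Set.inter, PySem.Set.contains, List.countP_eq_length_filter]
    rw [hlen]
    constructor <;> intro <;> omega
  rw [hL, hR, List.countP_eq_length_filter, List.countP_eq_length_filter]
  have hperm : List.Perm
      (((PySem.List.enumerate ng2).filter
        (fun p => decide (2 ≤ List.countP (fun e => decide (e ∈ p.2)) g))).map (fun p => p.1))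
      ((PySem.Set.ofList (pvL ng2 g)).filter
          (fun j => decide (2 ≤ (pvL ng2 g).count j))) := by
    apply (List.perm_ext_iff_of_nodup ?_ ?_).mpr
    · intro j
      simp only [List.mem_map, List.mem_filter, decide_eq_true_eq]
      constructor
      · rintro ⟨p, ⟨hpE, hpc⟩, rfl⟩
        have h2c : 2 ≤ (pvL ng2 g).count p.1 := (hkey p.1).mpr ⟨p, hpE, rfl, hpc⟩
        refine ⟨?_, h2c⟩
        rw [PySem.Set.mem_ofList]
        exact List.count_pos_iff.mp (by omega)
      · rintro ⟨-, h2c⟩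
        obtain ⟨p, hpE, hpj, hpc⟩ := (hkey j).mp h2c
        exact ⟨p, ⟨hpE, hpc⟩, hpj⟩
    · refine List.Pairwise.map _ (fun a b hab => ?_) (hE.filter _)
      exact ne_of_lt hab
    · exact (PySem.Set.nodup_ofList _).filter _
  have hlen := hperm.length_eq
  rw [List.length_map] at hlen
  exact hlen

theorem pv_nodup_mem_getNGrams (seq : List Int) (N : Int) :
    ∀ h ∈ pvGetNGrams seq N, List.Nodup h := by
  intro h hmem
  unfold pvGetNGrams at hmem
  rw [PySem.List.foldl_append_singleton_eq_map] at hmem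
  simp only [List.nil_append, List.mem_map] at hmem
  obtain ⟨i, -, rfl⟩ := hmem
  exact PySem.Set.nodup_ofList _

theorem pv_core (ng1 ng2 : List (PySem.Set Int)) (h2 : ∀ h ∈ ng2, List.Nodup h) :
    ng1.foldl (fun total i =>
        ng2.foldl (fun total j =>
          if 1 < PySem.Set.len (PySem.Set.inter i j) then total + 1 else total) total) 0
      = ng1.foldl (fun total g =>
          total + ((((g.foldl (fun c e =>
              ((pvIdx ng2).getD e []).foldl (fun c j => c.insert j (c.getD j 0 + 1)) c)
            (PySem.Dict.empty : PySem.Dict Int Int)).values).countP (fun c => 2 ≤ c)) : Int)) 0 := by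
  simp only [PySem.List.foldl_ite_add_one, PySem.List.foldl_add]
  congr 1
  congr 1
  apply List.map_congr_left
  intro g _
  have hc : (g.foldl (fun c e =>
        ((pvIdx ng2).getD e []).foldl (fun c j => c.insert j (c.getD j 0 + 1)) c)
      PySem.Dict.empty) = PySem.Dict.counter (pvL ng2 g) := by
    rw [← PySem.Dict.foldl_insert_getD_add_one_eq_counter]
    unfold pvL
    rw [List.foldl_flatMap]
  rw [hc]
  simp only [PySem.Dict.values, PySem.Dict.items_counter, List.map_map, Function.comp_def,
    List.countP_map]
  exact_mod_cast congrArg (fun n : Nat => (n : Int)) (pv_perG ng2 h2 g)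

theorem pv_main (seq1 seq2 : List Int) (N lenSeq1 : Int) :
    compareNGrams_asym seq1 seq2 N lenSeq1 = compareNGrams_asym_alt seq1 seq2 N lenSeq1 := by
  simp only [compareNGrams_asym, compareNGrams_asym_alt]
  exact pv_core (pvGetNGrams (PySem.List.slice seq1 none (some lenSeq1)) N)
    (pvGetNGrams seq2 N) (pv_nodup_mem_getNGrams seq2 N)

-- ===== VERDICT (by name: the statement is the Claim_ definition above) =====
theorem compareNGrams_asym_spec : Claim_equal_compareNGrams_asym := by
  intro seq1 seq2 N lenSeq1 _
  unfold Spec_compareNGrams_asym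
  exact pv_main seq1 seq2 N lenSeq1
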